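-- pv_equiv track=rewrite | github.com/datduong/stylegan2-ada-Ws-22q | WS22qOther/MakeSoftLabelImgScript_DiscreteAge.py | make_label_pairs
-- ===== SOURCE A (Python) =====
-- import itertools
--
-- def make_label_vec (thisname,labelset_head_in_gan,labelset_tail_in_gan):
--   vec = []
--   for head in labelset_head_in_gan:
--     if head in thisname:
--       vec.append ( labelset_head_in_gan[head] )
--       break
--   for tail in labelset_tail_in_gan:
--     if tail in thisname:
--       vec.append( labelset_tail_in_gan[tail] )
--       break
--   print ('label is {} vector is {}'.format(thisname,vec))
--   return ','.join(str(v) for v in vec)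
--
-- def make_label_pairs (name_array1,name_array2,labelset_head_in_gan,labelset_tail_in_gan):
--   pairs = { }
--   for n1 in name_array1: # should be age
--     for n2 in list(itertools.combinations(name_array2, 2)): # @n2 is array of tuple [(1,2)...]
--       t1 = make_label_vec(n2[0]+n1, labelset_head_in_gan,labelset_tail_in_gan)
--       t2 = make_label_vec(n2[1]+n1, labelset_head_in_gan,labelset_tail_in_gan)
--       pairs[n2[0]+n1+'_'+n2[1]+n1] = [t1,t2]
--       pairs[n2[1]+n1+'_'+n2[0]+n1] = [t2,t1]
--   return (pairs)
-- ===== SOURCE B (Python) =====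
-- import itertools
--
-- def _label_vec(name, head_map, tail_map):
--     parts = []
--     h = next((k for k in head_map if k in name), None)
--     if h is not None:
--         parts.append(head_map[h])
--     t = next((k for k in tail_map if k in name), None)
--     if t is not None:
--         parts.append(tail_map[t])
--     return ','.join(str(v) for v in parts)
--
-- def make_label_pairs(name_array1, name_array2, labelset_head_in_gan, labelset_tail_in_gan):
--     pairs = {}
--     for n1 in name_array1:
--         labeled = [(n2 + n1, _label_vec(n2 + n1, labelset_head_in_gan, labelset_tail_in_gan))
--                    for n2 in name_array2]
--         for (k1, t1), (k2, t2) in itertools.combinations(labeled, 2):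
--             pairs[k1 + '_' + k2] = [t1, t2]
--             pairs[k2 + '_' + k1] = [t2, t1]
--     return pairs
-- ===== Notes on version B (the rewrite author's own statement) =====
-- stated objective: faster
-- what changed: B computes each name's label vector once per (n2, n1) combination into a per-n1 list and assembles all pairs from those precomputed entries, instead of recomputing both label vectors for every unordered pair as A does.
import Mathlib
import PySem

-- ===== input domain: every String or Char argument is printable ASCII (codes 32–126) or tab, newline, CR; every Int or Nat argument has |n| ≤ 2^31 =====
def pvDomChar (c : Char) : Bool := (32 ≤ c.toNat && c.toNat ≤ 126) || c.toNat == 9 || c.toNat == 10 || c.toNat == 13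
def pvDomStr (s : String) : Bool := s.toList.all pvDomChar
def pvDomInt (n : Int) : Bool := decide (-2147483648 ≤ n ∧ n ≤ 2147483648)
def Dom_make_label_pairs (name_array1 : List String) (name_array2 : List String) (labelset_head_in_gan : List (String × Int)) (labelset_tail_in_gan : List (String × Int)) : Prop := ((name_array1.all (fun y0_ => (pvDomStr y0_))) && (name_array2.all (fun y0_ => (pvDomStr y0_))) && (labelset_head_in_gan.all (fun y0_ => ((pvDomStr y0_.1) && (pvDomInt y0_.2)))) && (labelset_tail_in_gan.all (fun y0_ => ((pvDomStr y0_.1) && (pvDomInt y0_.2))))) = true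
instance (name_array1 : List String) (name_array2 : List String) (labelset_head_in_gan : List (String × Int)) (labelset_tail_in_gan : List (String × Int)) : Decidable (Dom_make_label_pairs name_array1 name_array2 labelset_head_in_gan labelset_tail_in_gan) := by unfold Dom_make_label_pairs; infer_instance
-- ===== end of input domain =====

-- B precomputes each name's label vector once per (n2, n1) instead of recomputing it for every pair
-- (objective: faster, asymptotic); A also prints per label-vector call, B does not — return value equivalence only.


-- ===== PORT A =====
-- itertools.combinations(xs, 2), in Python's order
def pvCombos2 {α : Type} : List α → List (α × α)
  | [] => []
  | x :: xs => (xs.map (fun y => (x, y))) ++ pvCombos2 xs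

-- A's 'for head in dict: if head in thisname: …; break' loop
def pvFirstKey : List String → String → Option String
  | [], _ => none
  | k :: ks, s => if PySem.Str.isIn k s then some k else pvFirstKey ks s

-- make_label_vec of A (the print is a side effect only and is not ported)
def pvMakeLabelVec (thisname : String) (hd tl : PySem.Dict String Int) : String :=
  let vec : List Int :=
    (match pvFirstKey hd.keys thisname with
     | some h => [hd.getD h 0]
     | none => []) ++
    (match pvFirstKey tl.keys thisname with
     | some t => [tl.getD t 0]
     | none => [])
  PySem.Str.join "," (vec.map PySem.Int.toStr)

def make_label_pairs (name_array1 : List String) (name_array2 : List String) (labelset_head_in_gan : List (String × Int)) (labelset_tail_in_gan : List (String × Int)) : List (String × List String) :=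
  let hd := PySem.Dict.ofList labelset_head_in_gan
  let tl := PySem.Dict.ofList labelset_tail_in_gan
  (name_array1.foldl (fun pairs n1 =>
    (pvCombos2 name_array2).foldl (fun pairs n2 =>
      let t1 := pvMakeLabelVec (n2.1 ++ n1) hd tl
      let t2 := pvMakeLabelVec (n2.2 ++ n1) hd tl
      (pairs.insert (n2.1 ++ n1 ++ "_" ++ n2.2 ++ n1) [t1, t2]).insert
        (n2.2 ++ n1 ++ "_" ++ n2.1 ++ n1) [t2, t1])
      pairs)
    PySem.Dict.empty).items

-- ===== PORT B =====
-- B's label vector via first-match find (next(...) in Source B)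
def pvLabelVecAlt (name : String) (hd tl : PySem.Dict String Int) : String :=
  let parts : List Int :=
    ((hd.keys.find? (fun k => PySem.Str.isIn k name)).map (fun h => hd.getD h 0)).toList ++
    ((tl.keys.find? (fun k => PySem.Str.isIn k name)).map (fun t => tl.getD t 0)).toList
  PySem.Str.join "," (parts.map PySem.Int.toStr)

def make_label_pairs_alt (name_array1 : List String) (name_array2 : List String) (labelset_head_in_gan : List (String × Int)) (labelset_tail_in_gan : List (String × Int)) : List (String × List String) :=
  let hd := PySem.Dict.ofList labelset_head_in_gan
  let tl := PySem.Dict.ofList labelset_tail_in_gan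
  (name_array1.foldl (fun pairs n1 =>
    let labeled := name_array2.map (fun n2 => (n2 ++ n1, pvLabelVecAlt (n2 ++ n1) hd tl))
    (pvCombos2 labeled).foldl (fun pairs p =>
      (pairs.insert (p.1.1 ++ "_" ++ p.2.1) [p.1.2, p.2.2]).insert
        (p.2.1 ++ "_" ++ p.1.1) [p.2.2, p.1.2])
      pairs)
    PySem.Dict.empty).items

-- ===== PRECONDITION & SPEC =====
def Spec_make_label_pairs (name_array1 : List String) (name_array2 : List String) (labelset_head_in_gan : List (String × Int)) (labelset_tail_in_gan : List (String × Int)) (out : List (String × List String)) : Prop := out = make_label_pairs_alt name_array1 name_array2 labelset_head_in_gan labelset_tail_in_gan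
instance (name_array1 : List String) (name_array2 : List String) (labelset_head_in_gan : List (String × Int)) (labelset_tail_in_gan : List (String × Int)) (out : List (String × List String)) : Decidable (Spec_make_label_pairs name_array1 name_array2 labelset_head_in_gan labelset_tail_in_gan out) := by unfold Spec_make_label_pairs; infer_instance

-- ===== CLAIM (what is proved, stated in full; the proofs are below) =====
def Claim_equal_make_label_pairs : Prop := ∀ (name_array1 : List String) (name_array2 : List String) (labelset_head_in_gan : List (String × Int)) (labelset_tail_in_gan : List (String × Int)), Dom_make_label_pairs name_array1 name_array2 labelset_head_in_gan labelset_tail_in_gan → Spec_make_label_pairs name_array1 name_array2 labelset_head_in_gan labelset_tail_in_gan (make_label_pairs name_array1 name_array2 labelset_head_in_gan labelset_tail_in_gan)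

-- ===== LEMMAS AND PROOFS =====
theorem pvFirstKey_eq_find? (ks : List String) (s : String) :
    pvFirstKey ks s = ks.find? (fun k => PySem.Str.isIn k s) := by
  induction ks with
  | nil => rfl
  | cons k ks ih =>
    simp only [pvFirstKey, List.find?, ih, PySem.Str.isIn]
    cases PySem.Chars.isIn k.toList s.toList <;> rfl

theorem labelVec_eq (name : String) (hd tl : PySem.Dict String Int) :
    pvLabelVecAlt name hd tl = pvMakeLabelVec name hd tl := by
  simp only [pvLabelVecAlt, pvMakeLabelVec, pvFirstKey_eq_find?]
  cases hd.keys.find? (fun k => PySem.Str.isIn k name) <;>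
    cases tl.keys.find? (fun k => PySem.Str.isIn k name) <;> rfl

theorem pvCombos2_map {α β : Type} (g : α → β) (xs : List α) :
    pvCombos2 (xs.map g) = (pvCombos2 xs).map (fun p => (g p.1, g p.2)) := by
  induction xs with
  | nil => rfl
  | cons x xs ih => simp [pvCombos2, ih, List.map_map, Function.comp]

theorem pv_fold_eq (name_array1 name_array2 : List String) (hd tl : PySem.Dict String Int) :
    name_array1.foldl (fun pairs n1 =>
      (pvCombos2 name_array2).foldl (fun pairs n2 =>
        (pairs.insert (n2.1 ++ n1 ++ "_" ++ n2.2 ++ n1)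
          [pvMakeLabelVec (n2.1 ++ n1) hd tl, pvMakeLabelVec (n2.2 ++ n1) hd tl]).insert
          (n2.2 ++ n1 ++ "_" ++ n2.1 ++ n1)
          [pvMakeLabelVec (n2.2 ++ n1) hd tl, pvMakeLabelVec (n2.1 ++ n1) hd tl]) pairs)
      PySem.Dict.empty =
    name_array1.foldl (fun pairs n1 =>
      (pvCombos2 (name_array2.map (fun n2 => (n2 ++ n1, pvLabelVecAlt (n2 ++ n1) hd tl)))).foldl
        (fun pairs p =>
          (pairs.insert (p.1.1 ++ "_" ++ p.2.1) [p.1.2, p.2.2]).insert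
            (p.2.1 ++ "_" ++ p.1.1) [p.2.2, p.1.2]) pairs)
      PySem.Dict.empty := by
  apply PySem.List.foldl_congr_mem
  intro pairs n1 _
  rw [pvCombos2_map, List.foldl_map]
  apply PySem.List.foldl_congr_mem
  intro d p _
  simp only [labelVec_eq, String.append_assoc]

-- ===== VERDICT (by name: the statement is the Claim_ definition above) =====
theorem make_label_pairs_spec : Claim_equal_make_label_pairs := by
  intro name_array1 name_array2 lh lt _
  unfold Spec_make_label_pairs make_label_pairs make_label_pairs_alt
  exact congrArg PySem.Dict.items
    (pv_fold_eq name_array1 name_array2 (PySem.Dict.ofList lh) (PySem.Dict.ofList lt))
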